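-- pv_equiv track=rewrite | github.com/aerovfx/Fullstack4kid | APPENDIX_A/Python/PythonStudy/BoiBoistudy/Python_basic/python_nangcao/DE41/bai3.py | tim_pt_toi_da
-- ===== SOURCE A (Python) =====
-- def tim_pt_toi_da(m, n, w, h, a, b):
--     # Tạo ma trận tổng tích lũy
--     tong_tien_to = [[0] * (n + 1) for _ in range(m + 1)]
--     for i in range(1, m + 1):
--         for j in range(1, n + 1):
--             tong_tien_to[i][j] = tong_tien_to[i][j - 1] +tong_tien_to[i - 1][j] - tong_tien_to[i - 1][j - 1] + a[i - 1] + b[j - 1]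
--
--     pt = 0
--
--     # Duyệt qua tất cả các khung hình có kích thước w x h
--     for i in range(m - w + 1):
--         for j in range(n - h + 1):
--             # Tính tổng giá trị của khung hình hiện tại
--             reward = tong_tien_to[i + w][j + h] - tong_tien_to[i + w][j] - tong_tien_to[i][j + h] + tong_tien_to[i][j]
--             pt = max(pt, reward)
--
--     return pt
-- ===== SOURCE B (Python) =====
-- def tim_pt_toi_da(m, n, w, h, a, b):
--     # The w x h window sum of the separable matrix a[i]+b[j] is
--     # h * (w-window sum of a) + w * (h-window sum of b), so maximise each 1D part.
--     if w > m or h > n: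
--         return 0
--     s = sum(a[:w])
--     best_a = s
--     for i in range(w, m):
--         s += a[i] - a[i - w]
--         best_a = max(best_a, s)
--     t = sum(b[:h])
--     best_b = t
--     for j in range(h, n):
--         t += b[j] - b[j - h]
--         best_b = max(best_b, t)
--     return max(0, h * best_a + w * best_b)
-- ===== Notes on version B (the rewrite author's own statement) =====
-- stated objective: faster
-- what changed: Replaces the O(m*n) 2D prefix-sum table and double window scan by two independent 1D sliding-window maxima (the w*h window sum of the separable matrix a[i]+b[j] is h*(w-window sum of a) + w*(h-window sum of b)), giving O(m+n).
-- outside the precondition, e.g. on tim_pt_toi_da(0, 6, 0, 2, [-4, -2, 8, -6, 1, -5], [5, 9]): A returns 0, B raises IndexError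
import Mathlib
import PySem

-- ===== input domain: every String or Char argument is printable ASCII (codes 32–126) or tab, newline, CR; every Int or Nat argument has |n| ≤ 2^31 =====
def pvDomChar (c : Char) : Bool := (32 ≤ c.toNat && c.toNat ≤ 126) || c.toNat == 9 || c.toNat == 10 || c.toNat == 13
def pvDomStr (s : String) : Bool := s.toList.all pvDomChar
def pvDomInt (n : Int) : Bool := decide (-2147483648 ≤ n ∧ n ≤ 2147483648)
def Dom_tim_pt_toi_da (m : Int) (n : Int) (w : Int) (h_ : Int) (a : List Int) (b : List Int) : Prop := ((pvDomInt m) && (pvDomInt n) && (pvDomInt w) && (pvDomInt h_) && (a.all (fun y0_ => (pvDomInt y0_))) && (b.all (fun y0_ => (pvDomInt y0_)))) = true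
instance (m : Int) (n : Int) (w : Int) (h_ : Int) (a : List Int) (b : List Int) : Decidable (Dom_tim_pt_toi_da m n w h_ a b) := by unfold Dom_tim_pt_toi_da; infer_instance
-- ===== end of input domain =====

-- B replaces A's O(m*n) 2D prefix-sum table and full window scan by two 1D sliding-window
-- maxima (the matrix is separable: the w*h window sum is h*(w-window of a) + w*(h-window of b)), O(m+n).

-- ===== PORT A =====
-- tong_tien_to[i][j] (read); pyGetD is exact here: under Pre_ every index A uses is a valid nonnegative index
def pvGd2 (T : List (List Int)) (i j : Int) : Int :=
  PySem.List.pyGetD (PySem.List.pyGetD T i []) j 0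

-- tong_tien_to[i][j] = v (write)
def pvSet2 (T : List (List Int)) (i j : Int) (v : Int) : List (List Int) :=
  PySem.List.pySetD T i (PySem.List.pySetD (PySem.List.pyGetD T i []) j v)

def tim_pt_toi_da (m : Int) (n : Int) (w : Int) (h_ : Int) (a : List Int) (b : List Int) : Int :=
  -- tong_tien_to = [[0] * (n + 1) for _ in range(m + 1)]
  let T0 : List (List Int) :=
    (PySem.List.pyRange 0 (m + 1) 1).map (fun _ => List.replicate (n + 1).toNat 0)
  -- the two filling loops
  let T : List (List Int) :=
    (PySem.List.pyRange 1 (m + 1) 1).foldl (fun T i =>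
      (PySem.List.pyRange 1 (n + 1) 1).foldl (fun T j =>
        pvSet2 T i j (pvGd2 T i (j - 1) + pvGd2 T (i - 1) j - pvGd2 T (i - 1) (j - 1)
          + PySem.List.pyGetD a (i - 1) 0 + PySem.List.pyGetD b (j - 1) 0)) T) T0
  -- pt = 0; the two scanning loops
  (PySem.List.pyRange 0 (m - w + 1) 1).foldl (fun pt i =>
    (PySem.List.pyRange 0 (n - h_ + 1) 1).foldl (fun pt j =>
      max pt (pvGd2 T (i + w) (j + h_) - pvGd2 T (i + w) j - pvGd2 T i (j + h_) + pvGd2 T i j)) pt) 0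

-- ===== PORT B =====
def tim_pt_toi_da_alt (m : Int) (n : Int) (w : Int) (h_ : Int) (a : List Int) (b : List Int) : Int :=
  if w > m ∨ h_ > n then 0
  else
    let s0 : Int := (PySem.List.slice a none (some w)).sum
    let pa : Int × Int :=
      (PySem.List.pyRange w m 1).foldl (fun (p : Int × Int) i =>
        let s := p.1 + PySem.List.pyGetD a i 0 - PySem.List.pyGetD a (i - w) 0
        (s, max p.2 s)) (s0, s0)
    let t0 : Int := (PySem.List.slice b none (some h_)).sum
    let pb : Int × Int :=
      (PySem.List.pyRange h_ n 1).foldl (fun (p : Int × Int) j =>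
        let t := p.1 + PySem.List.pyGetD b j 0 - PySem.List.pyGetD b (j - h_) 0
        (t, max p.2 t)) (t0, t0)
    max 0 (h_ * pa.2 + w * pb.2)

-- ===== PRECONDITION & SPEC =====
-- Pre_ is exactly the set of inputs on which Python A returns: the build loops raise IndexError
-- unless they are empty (m ≤ 0 or n ≤ 0) or m ≤ len(a) and n ≤ len(b); the scan loops raise
-- unless they are empty (m < w or n < h_) or 0 ≤ w and 0 ≤ h_ with the lists long enough.
-- The only inputs A returns on that Pre_ excludes are malformed ones whose declared dimension
-- exceeds its list's length while a degenerate zero dimension (m = 0 or n = 0) leaves A's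
-- all-zero table untouched; A returns 0 there by accident and B's sliding loop raises IndexError.
def Pre_tim_pt_toi_da (m : Int) (n : Int) (w : Int) (h_ : Int) (a : List Int) (b : List Int) : Prop :=
  (m < w ∨ n < h_ ∨ (0 ≤ w ∧ 0 ≤ h_ ∧ m ≤ (a.length : Int) ∧ n ≤ (b.length : Int))) ∧
  (m ≤ 0 ∨ n ≤ 0 ∨ (m ≤ (a.length : Int) ∧ n ≤ (b.length : Int)))
instance (m : Int) (n : Int) (w : Int) (h_ : Int) (a : List Int) (b : List Int) : Decidable (Pre_tim_pt_toi_da m n w h_ a b) := by unfold Pre_tim_pt_toi_da; infer_instance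

def pvWitness_tim_pt_toi_da : Int × Int × Int × Int × List Int × List Int :=
  (3, 3, 2, 2, [1, 2, 3], [4, -5, 6])

def Spec_tim_pt_toi_da (m : Int) (n : Int) (w : Int) (h_ : Int) (a : List Int) (b : List Int) (out : Int) : Prop := out = tim_pt_toi_da_alt m n w h_ a b
instance (m : Int) (n : Int) (w : Int) (h_ : Int) (a : List Int) (b : List Int) (out : Int) : Decidable (Spec_tim_pt_toi_da m n w h_ a b out) := by unfold Spec_tim_pt_toi_da; infer_instance

-- ===== CLAIM (what is proved, stated in full; the proofs are below) =====
def Claim_equal_tim_pt_toi_da : Prop := ∀ (m : Int) (n : Int) (w : Int) (h_ : Int) (a : List Int) (b : List Int), Dom_tim_pt_toi_da m n w h_ a b → Pre_tim_pt_toi_da m n w h_ a b → Spec_tim_pt_toi_da m n w h_ a b (tim_pt_toi_da m n w h_ a b)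

-- ===== LEMMAS AND PROOFS =====

-- prefix sum of the first i entries, window sum of width wN starting at i, the prefix-table entry
def pvSA (l : List Int) (i : Nat) : Int := (l.take i).sum
def pvDA (l : List Int) (wN i : Nat) : Int := pvSA l (i + wN) - pvSA l i
def pvGood (a b : List Int) (i j : Nat) : Int := (j : Int) * pvSA a i + (i : Int) * pvSA b j
-- maximum of f over 0..K
def pvBest (f : Nat → Int) : Nat → Int
  | 0 => f 0
  | (k + 1) => max (pvBest f k) (f (k + 1))
-- table entry with Nat indices
def pvget2 (T : List (List Int)) (i j : Nat) : Int := (T.getD i []).getD j 0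

lemma pv_sum_take_succ (l : List Int) (i : Nat) (h : i < l.length) :
    (l.take (i + 1)).sum = (l.take i).sum + l[i] := by
  rw [List.take_succ, List.sum_append]
  simp [List.getElem?_eq_getElem h]

lemma pvGd2_natCast (T : List (List Int)) (i j : Nat) :
    pvGd2 T (i : Int) (j : Int) = pvget2 T i j := by
  simp [pvGd2, pvget2]

lemma pvget2_set2 (T : List (List Int)) (i j i' j' : Nat) (v : Int)
    (hi : i < T.length) (hj : j < (T.getD i []).length) :
    pvget2 (T.set i ((T.getD i []).set j v)) i' j' =
      if i' = i ∧ j' = j then v else pvget2 T i' j' := by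
  unfold pvget2
  rcases eq_or_ne i' i with rfl | hne
  · have houter : (T.set i' ((T.getD i' []).set j v)).getD i' [] = (T.getD i' []).set j v := by
      rw [List.getD_eq_getElem?_getD (l := T.set i' ((T.getD i' []).set j v)),
        List.getElem?_set_self hi, Option.getD_some]
    rw [houter]
    rcases eq_or_ne j' j with rfl | hj'
    · rw [List.getD_eq_getElem?_getD (l := (T.getD i' []).set j' v),
        List.getElem?_set_self hj, Option.getD_some]
      simp
    · have hrow : ((T.getD i' []).set j v).getD j' 0 = (T.getD i' []).getD j' 0 := by
        rw [List.getD_eq_getElem?_getD (l := (T.getD i' []).set j v),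
          List.getElem?_set_ne (Ne.symm hj'), ← List.getD_eq_getElem?_getD]
      rw [hrow]
      simp [hj']
  · have houter : (T.set i ((T.getD i []).set j v)).getD i' [] = T.getD i' [] := by
      rw [List.getD_eq_getElem?_getD (l := T.set i ((T.getD i []).set j v)),
        List.getElem?_set_ne (Ne.symm hne), ← List.getD_eq_getElem?_getD]
    rw [houter]
    simp [hne]

-- the recurrence A's filling loop implements is satisfied by pvGood
lemma pvGood_rec (a b : List Int) (i t : Nat) (hi : i < a.length) (ht : t < b.length) :
    pvGood a b (i + 1) (t + 1) =
      pvGood a b (i + 1) t + pvGood a b i (t + 1) - pvGood a b i t + a[i] + b[t] := by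
  simp only [pvGood, pvSA]
  rw [pv_sum_take_succ a i hi, pv_sum_take_succ b t ht]
  push_cast
  ring

-- rewards are separable
lemma pvReward_eq (a b : List Int) (wN hN i j : Nat) :
    pvGood a b (i + wN) (j + hN) - pvGood a b (i + wN) j - pvGood a b i (j + hN) + pvGood a b i j
      = (hN : Int) * pvDA a wN i + (wN : Int) * pvDA b hN j := by
  unfold pvGood pvDA; push_cast; ring

lemma pvBest_add_left (C : Int) (g : Nat → Int) (K : Nat) :
    pvBest (fun k => C + g k) K = C + pvBest g K := by
  induction K with
  | zero => simp [pvBest]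
  | succ k ih => simp only [pvBest, ih]; rw [max_add_add_left]

lemma pvBest_add_right (C : Int) (g : Nat → Int) (K : Nat) :
    pvBest (fun k => g k + C) K = pvBest g K + C := by
  induction K with
  | zero => simp [pvBest]
  | succ k ih => simp only [pvBest, ih]; rw [max_add_add_right]

lemma pvBest_mul_left (C : Int) (hC : 0 ≤ C) (g : Nat → Int) (K : Nat) :
    pvBest (fun k => C * g k) K = C * pvBest g K := by
  induction K with
  | zero => simp [pvBest]
  | succ k ih => simp only [pvBest, ih]; rw [mul_max_of_nonneg _ _ hC]

lemma pv_foldl_max_range (f : Nat → Int) (c : Int) (K : Nat) :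
    (List.range (K + 1)).foldl (fun acc k => max acc (f k)) c = max c (pvBest f K) := by
  induction K with
  | zero => simp [pvBest]
  | succ k ih =>
      rw [List.range_succ, List.foldl_append, ih]
      simp [pvBest, max_assoc]

-- the whole scan double loop in terms of pvBest
lemma pv_scan_eq (F G : Nat → Int) (Ki Kj : Nat) :
    (List.range (Ki + 1)).foldl (fun pt i =>
      (List.range (Kj + 1)).foldl (fun pt j => max pt (F i + G j)) pt) 0
      = max 0 (pvBest F Ki + pvBest G Kj) := by
  have hinner : ∀ (pt : Int) (i : Nat),
      (List.range (Kj + 1)).foldl (fun pt j => max pt (F i + G j)) pt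
        = max pt (F i + pvBest G Kj) := by
    intro pt i
    rw [pv_foldl_max_range (fun j => F i + G j) pt Kj, pvBest_add_left]
  rw [PySem.List.foldl_congr_mem _ _ (fun pt i => max pt (F i + pvBest G Kj)) 0
    (fun acc x _ => hinner acc x)]
  rw [pv_foldl_max_range (fun i => F i + pvBest G Kj) 0 Ki, pvBest_add_right]

-- invariant of A's filling loops: rows before i are filled, row i is filled up to column jk,
-- everything after is still the initial 0 (pvGood is 0 on row 0 / column 0, so the border agrees)
def pvInv (a b : List Int) (M N : Nat) (i jk : Nat) (T : List (List Int)) : Prop :=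
  T.length = M + 1 ∧ (∀ i' ≤ M, (T.getD i' []).length = N + 1) ∧
  (∀ i' ≤ M, ∀ j' ≤ N, pvget2 T i' j' =
    if i' < i ∨ (i' = i ∧ j' ≤ jk) then pvGood a b i' j' else 0)

lemma pvInv_init (a b : List Int) (M N : Nat) :
    pvInv a b M N 0 N (List.replicate (M + 1) (List.replicate (N + 1) (0 : Int))) := by
  have h0 : ∀ i' j' : Nat,
      pvget2 (List.replicate (M + 1) (List.replicate (N + 1) (0 : Int))) i' j' = 0 := by
    intro i' j'
    unfold pvget2
    have h1 : (List.replicate (M + 1) (List.replicate (N + 1) (0 : Int))).getD i' []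
        = if i' < M + 1 then List.replicate (N + 1) (0 : Int) else [] := by
      rw [List.getD_eq_getElem?_getD (l := List.replicate (M + 1) (List.replicate (N + 1) (0 : Int))),
        List.getElem?_replicate]
      split_ifs <;> rfl
    rw [h1]
    split_ifs with h2
    · rw [List.getD_eq_getElem?_getD (l := List.replicate (N + 1) (0 : Int)),
        List.getElem?_replicate]
      split_ifs <;> rfl
    · rfl
  refine ⟨by simp, ?_, ?_⟩
  · intro i' hi'
    rw [List.getD_eq_getElem?_getD, List.getElem?_replicate, if_pos (by omega)]
    simp
  · intro i' hi' j' hj'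
    rw [h0 i' j']
    split_ifs with hc
    · have hi0 : i' = 0 := by omega
      subst hi0
      simp [pvGood, pvSA]
    · rfl

lemma pvInv_row_shift (a b : List Int) (M N i : Nat) (T : List (List Int))
    (h : pvInv a b M N i N T) : pvInv a b M N (i + 1) 0 T := by
  obtain ⟨hL, hR, hE⟩ := h
  refine ⟨hL, hR, fun i' hi' j' hj' => ?_⟩
  rw [hE i' hi' j' hj']
  split_ifs with h1 h2 h2
  · rfl
  · omega
  · have : i' = i + 1 ∧ j' = 0 := by omega
    obtain ⟨rfl, rfl⟩ := this
    simp [pvGood, pvSA]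
  · rfl

-- one execution of the inner loop body
lemma pvInv_inner_step (a b : List Int) (M N : Nat) (ha : M ≤ a.length) (hb : N ≤ b.length)
    (k t : Nat) (hk : k < M) (ht : t < N) (T : List (List Int))
    (h : pvInv a b M N (k + 1) t T) :
    pvInv a b M N (k + 1) (t + 1)
      (pvSet2 T (1 + (k : Int)) (1 + (t : Int))
        (pvGd2 T (1 + (k : Int)) ((1 + (t : Int)) - 1) + pvGd2 T ((1 + (k : Int)) - 1) (1 + (t : Int))
          - pvGd2 T ((1 + (k : Int)) - 1) ((1 + (t : Int)) - 1)
          + PySem.List.pyGetD a ((1 + (k : Int)) - 1) 0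
          + PySem.List.pyGetD b ((1 + (t : Int)) - 1) 0)) := by
  obtain ⟨hL, hR, hE⟩ := h
  have e1 : (1 + (k : Int)) = ((k + 1 : Nat) : Int) := by push_cast; ring
  have e2 : (1 + (t : Int)) = ((t + 1 : Nat) : Int) := by push_cast; ring
  have e3 : ((1 + (k : Int)) - 1) = ((k : Nat) : Int) := by push_cast; ring
  have e4 : ((1 + (t : Int)) - 1) = ((t : Nat) : Int) := by push_cast; ring
  have hiT : k + 1 < T.length := by omega
  have hrow : (T.getD (k + 1) []).length = N + 1 := hR (k + 1) (by omega)
  have hjrow : t + 1 < (T.getD (k + 1) []).length := by omega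
  have hset : pvSet2 T (1 + (k : Int)) (1 + (t : Int))
        (pvGd2 T (1 + (k : Int)) ((1 + (t : Int)) - 1) + pvGd2 T ((1 + (k : Int)) - 1) (1 + (t : Int))
          - pvGd2 T ((1 + (k : Int)) - 1) ((1 + (t : Int)) - 1)
          + PySem.List.pyGetD a ((1 + (k : Int)) - 1) 0
          + PySem.List.pyGetD b ((1 + (t : Int)) - 1) 0)
      = T.set (k + 1) ((T.getD (k + 1) []).set (t + 1)
          (pvget2 T (k + 1) t + pvget2 T k (t + 1) - pvget2 T k t
            + a.getD k 0 + b.getD t 0)) := by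
    rw [e3, e4, e1, e2]
    unfold pvSet2
    rw [PySem.List.pySetD_natCast, PySem.List.pyGetD_natCast, PySem.List.pySetD_natCast,
      pvGd2_natCast, pvGd2_natCast, pvGd2_natCast, PySem.List.pyGetD_natCast,
      PySem.List.pyGetD_natCast]
  rw [hset]
  have hak : a.getD k 0 = a[k]'(by omega) := List.getD_eq_getElem a 0 (by omega)
  have hbt : b.getD t 0 = b[t]'(by omega) := List.getD_eq_getElem b 0 (by omega)
  have hv : pvget2 T (k + 1) t + pvget2 T k (t + 1) - pvget2 T k t + a.getD k 0 + b.getD t 0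
      = pvGood a b (k + 1) (t + 1) := by
    rw [hE (k + 1) (by omega) t (by omega), if_pos (by omega),
      hE k (by omega) (t + 1) (by omega), if_pos (by omega),
      hE k (by omega) t (by omega), if_pos (by omega), hak, hbt]
    exact (pvGood_rec a b k t (by omega) (by omega)).symm
  refine ⟨by simpa using hL, ?_, ?_⟩
  · intro i' hi'
    rcases eq_or_ne i' (k + 1) with rfl | hne
    · rw [List.getD_eq_getElem?_getD, List.getElem?_set_self hiT, Option.getD_some]
      simpa using hrow
    · rw [List.getD_eq_getElem?_getD, List.getElem?_set_ne (Ne.symm hne),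
        ← List.getD_eq_getElem?_getD]
      exact hR i' hi'
  · intro i' hi' j' hj'
    rw [pvget2_set2 T (k + 1) (t + 1) i' j' _ hiT hjrow]
    split_ifs with hc1 hc2 hc2
    · obtain ⟨rfl, rfl⟩ := hc1
      exact hv
    · obtain ⟨rfl, rfl⟩ := hc1
      omega
    · rw [hE i' hi' j' hj']
      rw [if_pos (by omega)]
    · rw [hE i' hi' j' hj']
      rw [if_neg (by omega)]

-- the full inner loop for row k+1
lemma pv_inner (a b : List Int) (M N : Nat) (ha : M ≤ a.length) (hb : N ≤ b.length)
    (k : Nat) (hk : k < M) (T : List (List Int)) (h : pvInv a b M N (k + 1) 0 T) :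
    pvInv a b M N (k + 1) N
      ((List.range N).foldl (fun T (t : Nat) =>
        pvSet2 T (1 + (k : Int)) (1 + (t : Int))
          (pvGd2 T (1 + (k : Int)) ((1 + (t : Int)) - 1)
            + pvGd2 T ((1 + (k : Int)) - 1) (1 + (t : Int))
            - pvGd2 T ((1 + (k : Int)) - 1) ((1 + (t : Int)) - 1)
            + PySem.List.pyGetD a ((1 + (k : Int)) - 1) 0
            + PySem.List.pyGetD b ((1 + (t : Int)) - 1) 0)) T) := by
  suffices hs : ∀ K ≤ N, pvInv a b M N (k + 1) K
      ((List.range K).foldl (fun T (t : Nat) =>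
        pvSet2 T (1 + (k : Int)) (1 + (t : Int))
          (pvGd2 T (1 + (k : Int)) ((1 + (t : Int)) - 1)
            + pvGd2 T ((1 + (k : Int)) - 1) (1 + (t : Int))
            - pvGd2 T ((1 + (k : Int)) - 1) ((1 + (t : Int)) - 1)
            + PySem.List.pyGetD a ((1 + (k : Int)) - 1) 0
            + PySem.List.pyGetD b ((1 + (t : Int)) - 1) 0)) T) by
    exact hs N le_rfl
  intro K
  induction K with
  | zero => intro _; simpa using h
  | succ K ih =>
      intro hK
      rw [List.range_succ, List.foldl_append, List.foldl_cons, List.foldl_nil]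
      exact pvInv_inner_step a b M N ha hb k K hk (by omega) _ (ih (by omega))

-- the filled table
lemma pv_table (a b : List Int) (M N : Nat) (ha : M ≤ a.length) (hb : N ≤ b.length) :
    pvInv a b M N M N
      ((PySem.List.pyRange 1 ((M : Int) + 1) 1).foldl (fun T i =>
        (PySem.List.pyRange 1 ((N : Int) + 1) 1).foldl (fun T j =>
          pvSet2 T i j (pvGd2 T i (j - 1) + pvGd2 T (i - 1) j - pvGd2 T (i - 1) (j - 1)
            + PySem.List.pyGetD a (i - 1) 0 + PySem.List.pyGetD b (j - 1) 0)) T)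
        (List.replicate ((M : Int) + 1).toNat (List.replicate ((N : Int) + 1).toNat 0))) := by
  simp only [PySem.List.pyRange_one, List.foldl_map]
  rw [show ((M : Int) + 1 - 1).toNat = M by omega, show ((N : Int) + 1 - 1).toNat = N by omega,
    show ((M : Int) + 1).toNat = M + 1 by omega, show ((N : Int) + 1).toNat = N + 1 by omega]
  suffices hs : ∀ k ≤ M, pvInv a b M N k N
      ((List.range k).foldl (fun T (i : Nat) =>
        (List.range N).foldl (fun T (t : Nat) =>
          pvSet2 T (1 + (i : Int)) (1 + (t : Int))
            (pvGd2 T (1 + (i : Int)) ((1 + (t : Int)) - 1)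
              + pvGd2 T ((1 + (i : Int)) - 1) (1 + (t : Int))
              - pvGd2 T ((1 + (i : Int)) - 1) ((1 + (t : Int)) - 1)
              + PySem.List.pyGetD a ((1 + (i : Int)) - 1) 0
              + PySem.List.pyGetD b ((1 + (t : Int)) - 1) 0)) T)
        (List.replicate (M + 1) (List.replicate (N + 1) (0 : Int)))) by
    exact hs M le_rfl
  intro k
  induction k with
  | zero => intro _; simpa using pvInv_init a b M N
  | succ k ih =>
      intro hk
      rw [List.range_succ, List.foldl_append, List.foldl_cons, List.foldl_nil]
      exact pv_inner a b M N ha hb k (by omega) _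
        (pvInv_row_shift a b M N k _ (ih (by omega)))

-- B's sliding loop computes the running window sum and its maximum
lemma pv_slide (l : List Int) (wN K : Nat) (hK : wN + K ≤ l.length) :
    (List.range K).foldl (fun (p : Int × Int) (k : Nat) =>
        (p.1 + PySem.List.pyGetD l ((wN : Int) + (k : Int)) 0
            - PySem.List.pyGetD l ((wN : Int) + (k : Int) - (wN : Int)) 0,
         max p.2 (p.1 + PySem.List.pyGetD l ((wN : Int) + (k : Int)) 0
            - PySem.List.pyGetD l ((wN : Int) + (k : Int) - (wN : Int)) 0)))
        (pvSA l wN, pvSA l wN)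
      = (pvDA l wN K, pvBest (pvDA l wN) K) := by
  induction K with
  | zero => simp [pvDA, pvBest, pvSA]
  | succ K ih =>
      rw [List.range_succ, List.foldl_append, ih (by omega), List.foldl_cons, List.foldl_nil]
      have eK : ((wN : Int) + (K : Int)) = ((wN + K : Nat) : Int) := by push_cast; ring
      have eK2 : ((wN : Int) + (K : Int)) - (wN : Int) = ((K : Nat) : Int) := by push_cast; ring
      have hs : pvDA l wN K + PySem.List.pyGetD l ((wN : Int) + (K : Int)) 0
          - PySem.List.pyGetD l ((wN : Int) + (K : Int) - (wN : Int)) 0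
          = pvDA l wN (K + 1) := by
        rw [eK2, eK, PySem.List.pyGetD_natCast, PySem.List.pyGetD_natCast]
        have h1 : l.getD (wN + K) 0 = (l.take (wN + K + 1)).sum - (l.take (wN + K)).sum := by
          rw [List.getD_eq_getElem l 0 (show wN + K < l.length by omega),
            pv_sum_take_succ l (wN + K) (by omega)]
          ring
        have h2 : l.getD K 0 = (l.take (K + 1)).sum - (l.take K).sum := by
          rw [List.getD_eq_getElem l 0 (show K < l.length by omega),
            pv_sum_take_succ l K (by omega)]
          ring
        rw [h1, h2]
        simp only [pvDA, pvSA]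
        rw [show K + wN = wN + K from by omega, show K + 1 + wN = wN + K + 1 from by omega]
        ring
      simp only []
      rw [hs]
      simp only [pvBest]

lemma pv_foldl_id {α : Type} (l : List α) (c : Int) :
    l.foldl (fun (pt : Int) (_ : α) => pt) c = c := by
  induction l <;> simp [*]

-- the row comprehension [[0]*(n+1) for _ in range(m+1)] is a replicate
lemma pv_T0_eq (m n : Int) :
    (PySem.List.pyRange 0 (m + 1) 1).map (fun _ => List.replicate (n + 1).toNat (0 : Int))
      = List.replicate (m + 1).toNat (List.replicate (n + 1).toNat 0) := by
  simp [PySem.List.pyRange_one, List.map_map, Function.comp_def, List.map_const']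

-- the scan double loop of A, for any table satisfying the invariant
lemma pv_scan_of_inv (a b : List Int) (M N wN hN : Nat) (hw : wN ≤ M) (hh : hN ≤ N)
    (T : List (List Int)) (hT : pvInv a b M N M N T) :
    (List.range (M - wN + 1)).foldl (fun pt (k : Nat) =>
        (List.range (N - hN + 1)).foldl (fun pt (j : Nat) =>
          max pt (pvGd2 T ((k : Int) + (wN : Int)) ((j : Int) + (hN : Int))
            - pvGd2 T ((k : Int) + (wN : Int)) (j : Int)
            - pvGd2 T (k : Int) ((j : Int) + (hN : Int)) + pvGd2 T (k : Int) (j : Int))) pt) 0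
      = max 0 ((hN : Int) * pvBest (pvDA a wN) (M - wN)
          + (wN : Int) * pvBest (pvDA b hN) (N - hN)) := by
  obtain ⟨hTL, hTR, hTE⟩ := hT
  have hgood : ∀ i' j' : Nat, i' ≤ M → j' ≤ N → pvGd2 T (i' : Int) (j' : Int) = pvGood a b i' j' := by
    intro i' j' h1 h2
    rw [pvGd2_natCast, hTE i' h1 j' h2, if_pos (by omega)]
  rw [PySem.List.foldl_congr_mem _ _
    (fun pt k => (List.range (N - hN + 1)).foldl
      (fun pt j => max pt ((hN : Int) * pvDA a wN k + (wN : Int) * pvDA b hN j)) pt) 0 ?_]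
  · rw [pv_scan_eq (fun k => (hN : Int) * pvDA a wN k) (fun j => (wN : Int) * pvDA b hN j)
      (M - wN) (N - hN)]
    rw [pvBest_mul_left _ (Int.natCast_nonneg hN) _ _, pvBest_mul_left _ (Int.natCast_nonneg wN) _ _]
  · intro acc k hk
    have hkM : k ≤ M - wN := by have := List.mem_range.mp hk; omega
    refine PySem.List.foldl_congr_mem _ _ _ _ ?_
    intro pt j hj
    have hjN : j ≤ N - hN := by have := List.mem_range.mp hj; omega
    congr 1
    rw [show ((k : Int) + (wN : Int)) = ((k + wN : Nat) : Int) from by push_cast; ring,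
      show ((j : Int) + (hN : Int)) = ((j + hN : Nat) : Int) from by push_cast; ring]
    rw [hgood (k + wN) (j + hN) (by omega) (by omega), hgood (k + wN) j (by omega) (by omega),
      hgood k (j + hN) (by omega) (by omega), hgood k j (by omega) (by omega)]
    exact pvReward_eq a b wN hN k j

-- A on the standard inputs
lemma pvA_standard (a b : List Int) (M N wN hN : Nat) (hw : wN ≤ M) (hh : hN ≤ N)
    (ha : M ≤ a.length) (hb : N ≤ b.length) :
    tim_pt_toi_da (M : Int) (N : Int) (wN : Int) (hN : Int) a b
      = max 0 ((hN : Int) * pvBest (pvDA a wN) (M - wN)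
          + (wN : Int) * pvBest (pvDA b hN) (N - hN)) := by
  simp only [tim_pt_toi_da]
  rw [pv_T0_eq]
  rw [show ((M : Int) - (wN : Int) + 1) = ((M - wN + 1 : Nat) : Int) from by omega,
    show ((N : Int) - (hN : Int) + 1) = ((N - hN + 1 : Nat) : Int) from by omega]
  rw [PySem.List.pyRange_zero_nat, PySem.List.pyRange_zero_nat]
  simp only [List.foldl_map]
  exact pv_scan_of_inv a b M N wN hN hw hh _ (pv_table a b M N ha hb)

-- B on the standard inputs
lemma pvB_standard (a b : List Int) (M N wN hN : Nat) (hw : wN ≤ M) (hh : hN ≤ N)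
    (ha : M ≤ a.length) (hb : N ≤ b.length) :
    tim_pt_toi_da_alt (M : Int) (N : Int) (wN : Int) (hN : Int) a b
      = max 0 ((hN : Int) * pvBest (pvDA a wN) (M - wN)
          + (wN : Int) * pvBest (pvDA b hN) (N - hN)) := by
  simp only [tim_pt_toi_da_alt]
  rw [if_neg (by omega : ¬((wN : Int) > (M : Int) ∨ (hN : Int) > (N : Int)))]
  rw [PySem.List.slice_to_natCast, PySem.List.slice_to_natCast]
  rw [PySem.List.pyRange_one, PySem.List.pyRange_one]
  rw [show ((M : Int) - (wN : Int)).toNat = M - wN from by omega,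
    show ((N : Int) - (hN : Int)).toNat = N - hN from by omega]
  simp only [List.foldl_map]
  rw [show (a.take wN).sum = pvSA a wN from rfl, show (b.take hN).sum = pvSA b hN from rfl]
  rw [pv_slide a wN (M - wN) (by omega), pv_slide b hN (N - hN) (by omega)]

-- A returns 0 when the scan loops are empty
lemma pvA_degenerate (m n w h_ : Int) (a b : List Int) (h : m < w ∨ n < h_) :
    tim_pt_toi_da m n w h_ a b = 0 := by
  unfold tim_pt_toi_da
  rcases h with h | h
  · rw [PySem.List.pyRange_one_eq_nil (show m - w + 1 ≤ 0 by omega)]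
    rfl
  · simp only [PySem.List.pyRange_one_eq_nil (show n - h_ + 1 ≤ 0 by omega), List.foldl_nil]
    exact pv_foldl_id _ 0

-- ===== VERDICT (by name: the statement is the Claim_ definition above) =====
theorem tim_pt_toi_da_spec : Claim_equal_tim_pt_toi_da := by
  intro m n w h_ a b _ hpre
  unfold Spec_tim_pt_toi_da
  by_cases hdeg : m < w ∨ n < h_
  · rw [pvA_degenerate m n w h_ a b hdeg]
    simp only [tim_pt_toi_da_alt]
    rw [if_pos (show w > m ∨ h_ > n from hdeg)]
  · obtain ⟨hp1, hp2⟩ := hpre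
    have hstd : 0 ≤ w ∧ 0 ≤ h_ ∧ m ≤ (a.length : Int) ∧ n ≤ (b.length : Int) := by
      rcases hp1 with h | h | h
      · exact absurd (Or.inl h) hdeg
      · exact absurd (Or.inr h) hdeg
      · exact h
    obtain ⟨hw0, hh0, hma, hnb⟩ := hstd
    push_neg at hdeg
    obtain ⟨hwm, hhn⟩ := hdeg
    obtain ⟨wN, rfl⟩ : ∃ k : Nat, w = (k : Int) := ⟨w.toNat, (Int.toNat_of_nonneg hw0).symm⟩
    obtain ⟨hN, rfl⟩ : ∃ k : Nat, h_ = (k : Int) := ⟨h_.toNat, (Int.toNat_of_nonneg hh0).symm⟩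
    obtain ⟨M, rfl⟩ : ∃ k : Nat, m = (k : Int) :=
      ⟨m.toNat, (Int.toNat_of_nonneg (le_trans hw0 hwm)).symm⟩
    obtain ⟨N, rfl⟩ : ∃ k : Nat, n = (k : Int) :=
      ⟨n.toNat, (Int.toNat_of_nonneg (le_trans hh0 hhn)).symm⟩
    rw [pvA_standard a b M N wN hN (by omega) (by omega) (by omega) (by omega),
      pvB_standard a b M N wN hN (by omega) (by omega) (by omega) (by omega)]
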